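-- pv_equiv track=rewrite | github.com/sharathgts-source/python-project | smart_resume_parser/smart_resume_parser/smart_parser.py | find_section_ranges
-- ===== SOURCE A (Python) =====
-- from typing import Dict, List
--
-- SECTION_HEADERS = [
--     "summary","objective","skills","technical skills","education","experience","work experience",
--     "projects","certifications","certificates","publications","courses","interests","languages"
-- ]
--
-- def find_section_ranges(lines: List[str]) -> Dict[str, tuple]:
--     # locate lines that look like section headers
--     idxs = {}
--     for i, line in enumerate(lines):
--         l = line.strip().lower().rstrip(":")
--         if l in SECTION_HEADERS or any(l.startswith(h + ":") for h in SECTION_HEADERS):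
--             # map header to line index
--             idxs[i] = l
--     # build ranges: header line -> (start, end)
--     sorted_headers = sorted(idxs.items(), key=lambda x: x[0])
--     ranges = {}
--     for j, (i, header) in enumerate(sorted_headers):
--         start = i + 1
--         end = (sorted_headers[j+1][0]) if j+1 < len(sorted_headers) else len(lines)
--         ranges[header] = (start, end)
--     return ranges
-- ===== SOURCE B (Python) =====
-- SECTION_HEADERS = [
--     "summary","objective","skills","technical skills","education","experience","work experience",
--     "projects","certifications","certificates","publications","courses","interests","languages"
-- ]
--
-- def find_section_ranges(lines):
--     # single forward pass: keep the currently open (index, header) and close it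
--     # when the next header line (or the end of input) is reached
--     ranges = {}
--     open_pair = None  # (line index, normalized header)
--     for i, line in enumerate(lines):
--         l = line.strip().lower().rstrip(":")
--         if l in SECTION_HEADERS or any(l.startswith(h + ":") for h in SECTION_HEADERS):
--             if open_pair is not None:
--                 ranges[open_pair[1]] = (open_pair[0] + 1, i)
--             open_pair = (i, l)
--     if open_pair is not None:
--         ranges[open_pair[1]] = (open_pair[0] + 1, len(lines))
--     return ranges
-- ===== Notes on version B (the rewrite author's own statement) =====
-- stated objective: simpler
-- what changed: Replaces A's two-phase plan (build an index->header dict, then sort its items and scan with a j+1 lookahead) by a single forward pass that keeps the currently open (index, header) pair and closes it when the next header line or the end of input is reached, eliminating the intermediate dict and the sorted()+lookahead pass.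
import Mathlib
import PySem

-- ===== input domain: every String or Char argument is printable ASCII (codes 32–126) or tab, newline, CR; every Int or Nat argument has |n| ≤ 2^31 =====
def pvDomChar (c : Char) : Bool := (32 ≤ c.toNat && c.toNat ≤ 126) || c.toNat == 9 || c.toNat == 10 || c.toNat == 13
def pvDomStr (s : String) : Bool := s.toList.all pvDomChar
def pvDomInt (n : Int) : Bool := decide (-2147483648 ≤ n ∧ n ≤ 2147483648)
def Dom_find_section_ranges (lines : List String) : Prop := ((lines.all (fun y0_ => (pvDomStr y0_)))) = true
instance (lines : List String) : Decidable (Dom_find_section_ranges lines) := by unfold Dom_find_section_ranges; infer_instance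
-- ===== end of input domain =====

-- B replaces A's two-phase plan (index dict, then sorted()+lookahead pass) by a single
-- forward pass that closes the currently open header when the next one (or the end) is found.

-- shared context: SECTION_HEADERS and the per-line normalization/test, identical in both Pythons
def pvHeaders : List String :=
  ["summary","objective","skills","technical skills","education","experience","work experience",
   "projects","certifications","certificates","publications","courses","interests","languages"]

-- line.strip().lower().rstrip(":"); rstrip(":") ported by hand (drop trailing ':' chars) — exact
def pvNorm (line : String) : String :=
  String.ofList (((PySem.Chars.lower (PySem.Chars.strip line.toList)).reverse.dropWhile
    (fun c => c == ':')).reverse)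

-- l in SECTION_HEADERS or any(l.startswith(h + ":") for h in SECTION_HEADERS)
def pvIsHeader (l : String) : Bool :=
  pvHeaders.contains l || pvHeaders.any (fun h => PySem.Str.startswith l (h ++ ":"))

-- ===== PORT A =====
def find_section_ranges (lines : List String) : List (String × Int × Int) :=
  let idxs : PySem.Dict Int String :=
    (PySem.List.enumerate lines).foldl (fun d p =>
      let l := pvNorm p.2
      if pvIsHeader l then d.insert p.1 l else d) PySem.Dict.empty
  let sorted_headers := PySem.List.sorted idxs.items (fun x => x.1)
  let ranges : PySem.Dict String (Int × Int) :=
    (PySem.List.enumerate sorted_headers).foldl (fun r q =>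
      let start := q.2.1 + 1
      let end_ := if q.1 + 1 < (sorted_headers.length : Int)
        then (PySem.List.pyGetD sorted_headers (q.1 + 1) (0, "")).1
        else (lines.length : Int)
      r.insert q.2.2 (start, end_)) PySem.Dict.empty
  ranges.items

-- ===== PORT B =====
def find_section_ranges_alt (lines : List String) : List (String × Int × Int) :=
  let st : PySem.Dict String (Int × Int) × Option (Int × String) :=
    (PySem.List.enumerate lines).foldl (fun s p =>
      let l := pvNorm p.2
      if pvIsHeader l then
        match s.2 with
        | some op => (s.1.insert op.2 (op.1 + 1, p.1), some (p.1, l))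
        | none => (s.1, some (p.1, l))
      else s) (PySem.Dict.empty, none)
  match st.2 with
  | some op => (st.1.insert op.2 (op.1 + 1, (lines.length : Int))).items
  | none => st.1.items

-- ===== PRECONDITION & SPEC =====
def Spec_find_section_ranges (lines : List String) (out : List (String × Int × Int)) : Prop := out = find_section_ranges_alt lines
instance (lines : List String) (out : List (String × Int × Int)) : Decidable (Spec_find_section_ranges lines out) := by unfold Spec_find_section_ranges; infer_instance

-- ===== CLAIM (what is proved, stated in full; the proofs are below) =====
def Claim_equal_find_section_ranges : Prop := ∀ (lines : List String), Dom_find_section_ranges lines → Spec_find_section_ranges lines (find_section_ranges lines)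

-- ===== LEMMAS AND PROOFS =====

-- the matching (index, normalized header) pairs, in line order
def pvMatches (lines : List String) : List (Int × String) :=
  ((PySem.List.enumerate lines).filter (fun p => pvIsHeader (pvNorm p.2))).map
    (fun p => (p.1, pvNorm p.2))

-- the common insertion sequence both ports perform: each match paired with the next
-- match's index (or len(lines) for the last)
def pvSeq (m : List (Int × String)) (n : Int) : List (String × Int × Int) :=
  (m.zip ((m.drop 1).map (·.1) ++ [n])).map (fun q => (q.1.2, (q.1.1 + 1, q.2)))

def pvIns (d : PySem.Dict String (Int × Int)) (s : List (String × Int × Int)) :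
    PySem.Dict String (Int × Int) :=
  s.foldl (fun r p => r.insert p.1 p.2) d

theorem pvSeq_single (i : Int) (h : String) (n : Int) :
    pvSeq [(i, h)] n = [(h, (i + 1, n))] := rfl

theorem pvSeq_cons_cons (i i' : Int) (h h' : String) (t : List (Int × String)) (n : Int) :
    pvSeq ((i, h) :: (i', h') :: t) n = (h, (i + 1, i')) :: pvSeq ((i', h') :: t) n := by
  simp [pvSeq]

theorem pvIns_cons (d : PySem.Dict String (Int × Int)) (p : String × Int × Int)
    (s : List (String × Int × Int)) : pvIns d (p :: s) = pvIns (d.insert p.1 p.2) s := rfl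

theorem pvMatches_pairwise (lines : List String) :
    (pvMatches lines).Pairwise (fun a b => a.1 < b.1) := by
  unfold pvMatches
  refine List.pairwise_map.mpr ?_
  exact (PySem.List.pairwise_lt_enumerate lines 0).filter _

-- A-side, phase 1+2: the index dict's items come out already sorted and equal pvMatches
theorem pvA_idxs (lines : List String) :
    PySem.List.sorted
      (((PySem.List.enumerate lines).foldl (fun d p =>
        if pvIsHeader (pvNorm p.2) then d.insert p.1 (pvNorm p.2) else d)
        (PySem.Dict.empty : PySem.Dict Int String)).items) (fun x => x.1)
      = pvMatches lines := by
  rw [PySem.List.foldl_if_eq_foldl_filter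
        (fun p : Int × String => pvIsHeader (pvNorm p.2))
        (fun (d : PySem.Dict Int String) p => d.insert p.1 (pvNorm p.2))]
  have hnd : (((PySem.List.enumerate lines).filter
      (fun p => pvIsHeader (pvNorm p.2))).map (fun p : Int × String => p.1)).Nodup := by
    have hp := (PySem.List.pairwise_lt_enumerate lines 0).filter
      (fun p => pvIsHeader (pvNorm p.2))
    simp only [List.Nodup, List.pairwise_map]
    exact hp.imp (fun hab => ne_of_lt hab)
  rw [PySem.Dict.items_foldl_insert_fresh _ (fun p : Int × String => p.1)
        (fun p => pvNorm p.2) _ (fun a _ => PySem.Dict.contains_empty a.1) hnd]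
  show PySem.List.sorted (pvMatches lines) (fun x => x.1) = pvMatches lines
  exact PySem.List.sorted_eq_self_of_pairwise _ _
    ((pvMatches_pairwise lines).imp (fun h => le_of_lt h))

-- A-side, phase 3: the lookahead loop inserts exactly pvSeq m n
theorem pvA_map (m : List (Int × String)) (n : Int) :
    (PySem.List.enumerate m).map (fun q =>
      ((q.2.2 : String), ((q.2.1 + 1 : Int),
        if q.1 + 1 < (m.length : Int)
        then (PySem.List.pyGetD m (q.1 + 1) (0, "")).1 else n))) = pvSeq m n := by
  apply List.ext_getElem
  · simp [pvSeq, PySem.List.length_enumerate]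
    omega
  · intro j h1 h2
    have hj : j < m.length := by simpa [PySem.List.length_enumerate] using h1
    rw [List.getElem_map, PySem.List.getElem_enumerate]
    simp only [pvSeq, List.getElem_map, List.getElem_zip, zero_add]
    by_cases hlast : j + 1 < m.length
    · have hc : ((j : Int) + 1) < (m.length : Int) := by exact_mod_cast hlast
      rw [if_pos hc]
      have hcast : (j : Int) + 1 = ((j + 1 : Nat) : Int) := by push_cast; ring
      rw [hcast, PySem.List.pyGetD_natCast, List.getD_eq_getElem _ _ hlast]
      have hlt : j < ((m.drop 1).map (·.1)).length := by simp; omega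
      rw [List.getElem_append_left hlt]
      simp
    · have hc : ¬ ((j : Int) + 1) < (m.length : Int) := by
        intro hc; exact hlast (by exact_mod_cast hc)
      rw [if_neg hc]
      have hge : ((m.drop 1).map (·.1)).length ≤ j := by simp; omega
      rw [List.getElem_append_right hge]
      simp

theorem pvA_fold (m : List (Int × String)) (n : Int) :
    (PySem.List.enumerate m).foldl (fun r q =>
        r.insert q.2.2 (q.2.1 + 1,
          if q.1 + 1 < (m.length : Int)
          then (PySem.List.pyGetD m (q.1 + 1) (0, "")).1 else n))
      (PySem.Dict.empty : PySem.Dict String (Int × Int))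
      = pvIns PySem.Dict.empty (pvSeq m n) := by
  simp only [pvIns]
  rw [← pvA_map m n, List.foldl_map]

-- B-side step function on the match list
def pvStep (s : PySem.Dict String (Int × Int) × Option (Int × String)) (p : Int × String) :
    PySem.Dict String (Int × Int) × Option (Int × String) :=
  match s.2 with
  | some op => (s.1.insert op.2 (op.1 + 1, p.1), some p)
  | none => (s.1, some p)

def pvFinal (n : Int) (s : PySem.Dict String (Int × Int) × Option (Int × String)) :
    PySem.Dict String (Int × Int) :=
  match s.2 with
  | some op => s.1.insert op.2 (op.1 + 1, n)
  | none => s.1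

-- B-side invariant: folding the matches with an open header builds pvIns of pvSeq
theorem pvB_fold (m : List (Int × String)) (n : Int) :
    ∀ (d : PySem.Dict String (Int × Int)) (oi : Int) (oh : String),
    pvFinal n (m.foldl pvStep (d, some (oi, oh))) = pvIns d (pvSeq ((oi, oh) :: m) n) := by
  induction m with
  | nil => intro d oi oh; simp [pvFinal, pvSeq_single, pvIns]
  | cons x t ih =>
      intro d oi oh
      obtain ⟨i, h⟩ := x
      rw [List.foldl_cons]
      show pvFinal n (t.foldl pvStep (d.insert oh (oi + 1, i), some (i, h))) = _
      rw [ih, pvSeq_cons_cons, pvIns_cons]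

-- both ports equal the same dict built from pvSeq (pvMatches lines)
theorem pvA_eq (lines : List String) :
    find_section_ranges lines
      = (pvIns PySem.Dict.empty (pvSeq (pvMatches lines) (lines.length : Int))).items := by
  simp only [find_section_ranges]
  rw [pvA_idxs lines]
  rw [pvA_fold (pvMatches lines) (lines.length : Int)]

theorem pvB_eq (lines : List String) :
    find_section_ranges_alt lines
      = (pvIns PySem.Dict.empty (pvSeq (pvMatches lines) (lines.length : Int))).items := by
  simp only [find_section_ranges_alt]
  rw [show ((PySem.List.enumerate lines).foldl (fun s p =>
        if pvIsHeader (pvNorm p.2) then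
          match s.2 with
          | some op => (s.1.insert op.2 (op.1 + 1, p.1), some (p.1, pvNorm p.2))
          | none => (s.1, some (p.1, pvNorm p.2))
        else s)
        ((PySem.Dict.empty : PySem.Dict String (Int × Int)), none))
      = (pvMatches lines).foldl pvStep (PySem.Dict.empty, none) by
    rw [PySem.List.foldl_if_eq_foldl_filter
        (fun p : Int × String => pvIsHeader (pvNorm p.2))
        (fun (s : PySem.Dict String (Int × Int) × Option (Int × String)) p =>
          match s.2 with
          | some op => (s.1.insert op.2 (op.1 + 1, p.1), some (p.1, pvNorm p.2))
          | none => (s.1, some (p.1, pvNorm p.2)))]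
    unfold pvMatches
    rw [List.foldl_map]
    rfl]
  cases hm : pvMatches lines with
  | nil => rfl
  | cons x t =>
      obtain ⟨i, h⟩ := x
      rw [List.foldl_cons]
      rw [show pvStep ((PySem.Dict.empty : PySem.Dict String (Int × Int)), none) (i, h)
            = (PySem.Dict.empty, some (i, h)) from rfl]
      have hb := pvB_fold t (lines.length : Int) PySem.Dict.empty i h
      rcases hF : t.foldl pvStep
          ((PySem.Dict.empty : PySem.Dict String (Int × Int)), some (i, h)) with ⟨d, op⟩
      rw [hF] at hb
      cases op with
      | none =>
          show d.items = _
          simp only [pvFinal] at hb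
          rw [hb]
      | some op' =>
          show (d.insert op'.2 (op'.1 + 1, (lines.length : Int))).items = _
          simp only [pvFinal] at hb
          rw [hb]

-- ===== VERDICT (by name: the statement is the Claim_ definition above) =====
theorem find_section_ranges_spec : Claim_equal_find_section_ranges := by
  intro lines _
  show find_section_ranges lines = find_section_ranges_alt lines
  rw [pvA_eq, pvB_eq]
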